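-- pv_equiv track=rewrite | github.com/Devesh511/project_DataCommunication | datalinklayer/bit_stuffing.py | de_frame
-- ===== SOURCE A (Python) =====
-- flag = "01111110"
--
-- def de_frame(data):
-- 	i = data[len(flag):-len(flag)]
--
-- 	count_1 = 0
-- 	frame = ""
-- 	for bit in i:
-- 		if count_1 == 5:
-- 			count_1 = 0
-- 			continue
-- 		if bit == "1":
-- 			count_1 += 1
-- 		else:
-- 			count_1 = 0
-- 		frame += bit
--
-- 	return frame
-- ===== SOURCE B (Python) =====
-- flag = "01111110"
--
-- def de_frame(data):
--     i = data[len(flag):-len(flag)]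
--     parts = []
--     while True:
--         j = i.find("11111")
--         if j == -1:
--             parts.append(i)
--             return "".join(parts)
--         parts.append(i[:j + 5])
--         i = i[j + 6:]
-- ===== Notes on version B (the rewrite author's own statement) =====
-- stated objective: faster
-- what changed: Replaces A's per-bit counter loop (count_1/frame state updated per character) by a find-based scan that repeatedly locates the next run of five consecutive one-bits with str.find, copies everything up to and including it, drops the one bit after it, and continues on the remainder; no per-bit Python-level state is kept.
import Mathlib
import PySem

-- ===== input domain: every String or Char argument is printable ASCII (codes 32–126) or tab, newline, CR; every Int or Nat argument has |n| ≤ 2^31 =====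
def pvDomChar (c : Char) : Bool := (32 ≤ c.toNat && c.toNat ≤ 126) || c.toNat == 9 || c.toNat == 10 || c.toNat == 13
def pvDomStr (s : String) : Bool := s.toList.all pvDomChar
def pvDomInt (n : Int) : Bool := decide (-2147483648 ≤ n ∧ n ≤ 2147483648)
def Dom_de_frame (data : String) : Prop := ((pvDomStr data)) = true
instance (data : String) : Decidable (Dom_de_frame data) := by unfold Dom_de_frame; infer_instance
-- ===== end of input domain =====

-- B replaces A's per-bit counter loop by find-based jumps: locate each run of five one-bits,
-- copy up to and including it, drop the following bit, continue after it (measured faster by a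
-- constant factor: str.find scans in C instead of per-character Python bytecode).

-- module constant: flag = "01111110"
def pyFlag : String := "01111110"

-- ===== PORT A =====
-- A's loop body: count_1/frame state updated per bit
def deframeStep (st : Int × List Char) (bit : Char) : Int × List Char :=
  if st.1 == 5 then (0, st.2)
  else if bit == '1' then (st.1 + 1, st.2 ++ [bit])
  else (0, st.2 ++ [bit])

-- A: strip the flags, then one pass with counter count_1 and accumulator frame
def de_frame (data : String) : String :=
  let i := PySem.Str.slice data (some (PySem.Str.len pyFlag)) (some (-(PySem.Str.len pyFlag)))
  String.ofList (i.toList.foldl deframeStep (0, [])).2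

-- ===== PORT B =====
-- the pattern "11111" B searches for
def fiveOnes : List Char := ['1', '1', '1', '1', '1']

-- termination helper for the while loop: after a hit, the remaining string is strictly shorter
theorem deframe_bloop_dec (i : List Char) (h : ¬ PySem.Chars.find i fiveOnes = -1) :
    (PySem.Chars.slice i (some (PySem.Chars.find i fiveOnes + 6)) none).length < i.length := by
  have h5 : fiveOnes <:+: i := (PySem.Chars.find_ne_neg_one_iff i _).mp h
  have hlen : 5 ≤ i.length := by simpa [fiveOnes] using h5.length_le
  have h0 : 0 ≤ PySem.Chars.find i fiveOnes := (PySem.Chars.find_nonneg_iff i _).mpr h5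
  rw [PySem.Chars.slice_eq_listSlice, PySem.List.slice_from _ (by omega)]
  simp only [List.length_drop]
  omega

-- B's while loop: j = i.find("11111"); if j == -1 keep the rest and stop, else keep i[:j+5] and continue on i[j+6:]
def deframeBLoop (i : List Char) : List Char :=
  let j := PySem.Chars.find i fiveOnes
  if hj : j = -1 then i
  else PySem.Chars.slice i none (some (j + 5)) ++ deframeBLoop (PySem.Chars.slice i (some (j + 6)) none)
  termination_by i.length
  decreasing_by exact deframe_bloop_dec i hj

def de_frame_alt (data : String) : String :=
  let i := PySem.Str.slice data (some (PySem.Str.len pyFlag)) (some (-(PySem.Str.len pyFlag)))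
  String.ofList (deframeBLoop i.toList)

-- ===== PRECONDITION & SPEC =====
def Spec_de_frame (data : String) (out : String) : Prop := out = de_frame_alt data
instance (data : String) (out : String) : Decidable (Spec_de_frame data out) := by unfold Spec_de_frame; infer_instance

-- ===== CLAIM (what is proved, stated in full; the proofs are below) =====
def Claim_equal_de_frame : Prop := ∀ (data : String), Dom_de_frame data → Spec_de_frame data (de_frame data)

-- ===== LEMMAS AND PROOFS =====

-- proof-side view of A's loop: counter-driven recursion producing the frame front-to-back
def deframeALoop : Int → List Char → List Char
  | _, [] => []
  | c, b :: t =>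
    if c == 5 then deframeALoop 0 t
    else if b == '1' then b :: deframeALoop (c + 1) t
    else b :: deframeALoop 0 t

-- A's foldl equals the recursion, with the accumulator made explicit
theorem deframeA_fold_eq (l : List Char) : ∀ (c : Int) (acc : List Char),
    (l.foldl deframeStep (c, acc)).2 = acc ++ deframeALoop c l := by
  induction l with
  | nil => intro c acc; simp [deframeALoop]
  | cons b t ih =>
    intro c acc
    rw [List.foldl_cons]
    by_cases hc : c = 5
    · have h : deframeStep (c, acc) b = (0, acc) := by simp [deframeStep, hc]
      rw [h, ih]
      simp [deframeALoop, hc]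
    · by_cases hb : b = '1'
      · have h : deframeStep (c, acc) b = (c + 1, acc ++ [b]) := by simp [deframeStep, hc, hb]
        rw [h, ih]
        simp [deframeALoop, hc, hb]
      · have h : deframeStep (c, acc) b = (0, acc ++ [b]) := by simp [deframeStep, hc, hb]
        rw [h, ih]
        simp [deframeALoop, hc, hb]

def onesRun (n : Nat) : List Char := List.replicate n '1'

theorem fiveOnes_eq : fiveOnes = onesRun 5 := rfl

-- dropping the run-of-ones context and k more lands in the appended tail
theorem deframe_drop_run_add (c k : Nat) (xs : List Char) :
    (onesRun c ++ xs).drop (c + k) = xs.drop k := by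
  have h := List.drop_length_add_append (l₁ := onesRun c) (l₂ := xs) (i := k)
  simp [onesRun] at h; exact h

theorem deframe_take_run (c : Nat) (xs : List Char) :
    (onesRun c ++ xs).take c = onesRun c := by
  have h := List.take_left (l₁ := onesRun c) (l₂ := xs)
  simpa [onesRun] using h

-- dropping past the run-of-ones context and one more bit lands in the tail
theorem deframe_drop_ctx (c k : Nat) (b : Char) (t : List Char) :
    (onesRun c ++ b :: t).drop (c + 1 + k) = t.drop k := by
  have h := deframe_drop_run_add c (1 + k) (b :: t)
  rw [← Nat.add_assoc] at h
  simpa [Nat.add_comm 1 k] using h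

-- shifting a run of ones through the counter
theorem deframeA_shift (c : Nat) : ∀ (d : Int) (l : List Char), 0 ≤ d → (c : Int) + d ≤ 5 →
    deframeALoop d (onesRun c ++ l) = onesRun c ++ deframeALoop ((c : Int) + d) l := by
  induction c with
  | zero => intro d l _ _; simp [onesRun]
  | succ c ih =>
    intro d l hd hc
    have h5 : ¬ (d == 5) = true := by simp; omega
    have h1 : onesRun (c + 1) ++ l = '1' :: (onesRun c ++ l) := by
      simp [onesRun, List.replicate_succ]
    rw [h1, deframeALoop, if_neg h5, if_pos (by simp)]
    rw [ih (d + 1) l (by omega) (by omega)]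
    have h2 : (c : Int) + (d + 1) = ((c + 1 : Nat) : Int) + d := by push_cast; ring
    rw [h2]
    simp [onesRun, List.replicate_succ]

-- if "11111" occurs nowhere in the run-context, A's loop copies its input unchanged
theorem deframeA_nomatch : ∀ (l : List Char) (c : Nat), c ≤ 4 →
    (∀ k : Nat, ¬ fiveOnes <+: (onesRun c ++ l).drop k) →
    deframeALoop (c : Int) l = l := by
  intro l
  induction l with
  | nil => intro c _ _; simp [deframeALoop]
  | cons b t ih =>
    intro c hc hno
    have h5 : ¬ (((c : Nat) : Int) == 5) = true := by simp; omega
    by_cases hb : b = '1'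
    · subst hb
      have hc3 : c ≤ 3 := by
        by_contra h
        have hc4 : c = 4 := by omega
        apply hno 0
        subst hc4
        simp only [List.drop_zero]
        have h4 : onesRun 4 ++ '1' :: t = fiveOnes ++ t := rfl
        rw [h4]
        exact ⟨t, rfl⟩
      have hctx : onesRun (c + 1) ++ t = onesRun c ++ '1' :: t := by
        simp [onesRun, List.replicate_succ']
      have := ih (c + 1) (by omega) (by rw [hctx]; exact hno)
      rw [deframeALoop, if_neg h5, if_pos (by simp)]
      push_cast at this ⊢
      rw [this]
    · have hnot : ∀ k : Nat, ¬ fiveOnes <+: (onesRun 0 ++ t).drop k := by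
        intro k hk
        apply hno (c + 1 + k)
        rw [deframe_drop_ctx]
        simpa [onesRun] using hk
      have := ih 0 (by omega) hnot
      rw [deframeALoop, if_neg h5, if_neg (by simp [hb])]
      simpa using congrArg (b :: ·) this

-- first occurrence of "11111" at offset j of the tail: A's loop copies j+5 bits, skips one, restarts
theorem deframeA_first : ∀ (l : List Char) (c j : Nat), c ≤ 4 →
    fiveOnes <+: l.drop j →
    (∀ k : Nat, k < c + j → ¬ fiveOnes <+: (onesRun c ++ l).drop k) →
    deframeALoop (c : Int) l = l.take (j + 5) ++ deframeALoop 0 (l.drop (j + 6)) := by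
  intro l
  induction l with
  | nil =>
    intro c j _ hpre _
    exfalso
    have := hpre.length_le
    simp [fiveOnes] at this
  | cons b t ih =>
    intro c j hc hpre hmin
    have h5 : ¬ (((c : Nat) : Int) == 5) = true := by simp; omega
    match j with
    | 0 =>
      simp only [List.drop_zero] at hpre
      obtain ⟨r, hr⟩ := hpre
      have hc0 : c = 0 := by
        by_contra h
        apply hmin (c - 1) (by omega)
        have hsplit : onesRun c ++ b :: t = onesRun (c - 1) ++ '1' :: (b :: t) := by
          have hc1 : c = (c - 1) + 1 := by omega
          rw [hc1]
          simp [onesRun, List.replicate_succ']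
        rw [hsplit]
        have hdrop : (onesRun (c - 1) ++ '1' :: (b :: t)).drop (c - 1) = '1' :: (b :: t) := by
          have h := deframe_drop_run_add (c - 1) 0 ('1' :: (b :: t))
          simpa using h
        rw [hdrop, ← hr]
        refine ⟨'1' :: r, ?_⟩
        rw [fiveOnes_eq]
        show '1' :: (onesRun 5 ++ r) = onesRun 5 ++ ('1' :: r)
        simp [onesRun, List.replicate_succ']
      subst hc0
      rw [← hr, fiveOnes_eq]
      have h50 : ((5 : Nat) : Int) + 0 = 5 := by norm_num
      have hshift := deframeA_shift 5 0 r (by omega) (by norm_num)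
      rw [h50] at hshift
      have htake : (onesRun 5 ++ r).take 5 = onesRun 5 := deframe_take_run 5 r
      have hdrop : (onesRun 5 ++ r).drop 6 = r.drop 1 := by
        have h := deframe_drop_run_add 5 1 r
        simpa using h
      simp only [Nat.zero_add, Nat.cast_zero] at hshift ⊢
      rw [hshift, htake, hdrop]
      congr 1
      match r with
      | [] => simp [deframeALoop]
      | x :: r' => simp [deframeALoop]
    | j' + 1 =>
      rw [List.drop_succ_cons] at hpre
      by_cases hb : b = '1'
      · subst hb
        have hc3 : c ≤ 3 := by
          by_contra h
          have hc4 : c = 4 := by omega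
          apply hmin 0 (by omega)
          subst hc4
          simp only [List.drop_zero]
          exact ⟨t, rfl⟩
        have hctx : onesRun (c + 1) ++ t = onesRun c ++ '1' :: t := by
          simp [onesRun, List.replicate_succ']
        have hmin' : ∀ k : Nat, k < (c + 1) + j' → ¬ fiveOnes <+: (onesRun (c + 1) ++ t).drop k := by
          intro k hk
          rw [hctx]
          exact hmin k (by omega)
        have := ih (c + 1) j' (by omega) hpre hmin'
        rw [deframeALoop, if_neg h5, if_pos (by simp)]
        push_cast at this ⊢
        rw [this]
        simp
      · have hmin' : ∀ k : Nat, k < 0 + j' → ¬ fiveOnes <+: (onesRun 0 ++ t).drop k := by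
          intro k hk
          have := hmin (c + 1 + k) (by omega)
          rw [deframe_drop_ctx] at this
          simpa [onesRun] using this
        have := ih 0 j' (by omega) hpre hmin'
        rw [deframeALoop, if_neg h5, if_neg (by simp [hb])]
        simp only [Nat.cast_zero] at this
        rw [this]
        simp

-- B's find-based loop computes exactly A's counter loop
theorem deframe_loops_eq : ∀ (n : Nat) (l : List Char), l.length ≤ n →
    deframeBLoop l = deframeALoop 0 l := by
  intro n
  induction n with
  | zero =>
    intro l hl
    have : l = [] := by
      cases l with
      | nil => rfl
      | cons a t => simp at hl
    subst this
    have hfind : PySem.Chars.find [] fiveOnes = -1 := by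
      rw [PySem.Chars.find_eq_neg_one_iff]
      intro h
      have := h.length_le
      simp [fiveOnes] at this
    rw [deframeBLoop, dif_pos hfind]
    simp [deframeALoop]
  | succ n ih =>
    intro l hl
    rw [deframeBLoop]
    by_cases hj : PySem.Chars.find l fiveOnes = -1
    · rw [dif_pos hj]
      have hninf : ¬ fiveOnes <:+: l := (PySem.Chars.find_eq_neg_one_iff l _).mp hj
      have hno : ∀ k : Nat, ¬ fiveOnes <+: (onesRun 0 ++ l).drop k := by
        intro k hk
        apply hninf
        simp only [onesRun, List.replicate_zero, List.nil_append] at hk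
        obtain ⟨r, hr⟩ := hk
        exact ⟨l.take k, r, by rw [List.append_assoc, hr, List.take_append_drop]⟩
      have := deframeA_nomatch l 0 (by omega) hno
      simpa using this.symm
    · rw [dif_neg hj]
      have h5 : fiveOnes <:+: l := (PySem.Chars.find_ne_neg_one_iff l _).mp hj
      have h0 : 0 ≤ PySem.Chars.find l fiveOnes := (PySem.Chars.find_nonneg_iff l _).mpr h5
      have hlen5 : 5 ≤ l.length := by simpa [fiveOnes] using h5.length_le
      have hle : PySem.Chars.find l fiveOnes ≤ l.length := PySem.Chars.find_le_length l _
      obtain ⟨hpre, hmin⟩ := PySem.Chars.find_spec (s := l) (sub := fiveOnes) h0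
      set J : Nat := (PySem.Chars.find l fiveOnes).toNat with hJ
      have hmin' : ∀ k : Nat, k < 0 + J → ¬ fiveOnes <+: (onesRun 0 ++ l).drop k := by
        intro k hk
        simpa [onesRun] using hmin k (by omega)
      have hA := deframeA_first l 0 J (by omega) hpre hmin'
      simp only [Nat.cast_zero] at hA
      rw [hA]
      rw [PySem.Chars.slice_eq_listSlice, PySem.Chars.slice_eq_listSlice,
        PySem.List.slice_to _ (by omega), PySem.List.slice_from _ (by omega)]
      have ht5 : (PySem.Chars.find l fiveOnes + 5).toNat = J + 5 := by omega
      have ht6 : (PySem.Chars.find l fiveOnes + 6).toNat = J + 6 := by omega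
      rw [ht5, ht6]
      congr 1
      apply ih
      have : J + 6 ≥ 1 := by omega
      simp only [List.length_drop]
      omega

-- ===== VERDICT (by name: the statement is the Claim_ definition above) =====
theorem de_frame_spec : Claim_equal_de_frame := by
  unfold Claim_equal_de_frame
  intro data _
  unfold Spec_de_frame de_frame de_frame_alt
  have key : ∀ L : List Char,
      String.ofList (L.foldl deframeStep (0, [])).2 = String.ofList (deframeBLoop L) := by
    intro L
    rw [deframeA_fold_eq, deframe_loops_eq L.length L (le_refl _)]
    simp
  exact key _
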